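-- pv_equiv track=rewrite | github.com/ivn1245/Proyectos-Laboratorio-de-Datos-2025 | 1er_clase.py | traductor_geringoso
-- ===== SOURCE A (Python) =====
-- def traductor_geringoso(lista):
--     res:dict={}
--     for elem in lista:
--         palabra=""
--         for i in range (len(elem)):
--             palabra+=elem[i]
--             if (elem[i] in ["a","e","i","o","u"]):
--                 palabra+="p"
--                 palabra+=elem[i]
--         res[elem] = palabra
--     return res
-- ===== SOURCE B (Python) =====
-- def traductor_geringoso(lista):
--     res = {}
--     for elem in lista:
--         res[elem] = (elem.replace('a', 'apa').replace('e', 'epe')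
--                          .replace('i', 'ipi').replace('o', 'opo').replace('u', 'upu'))
--     return res
-- ===== Notes on version B (the rewrite author's own statement) =====
-- stated objective: idiomatic
-- what changed: Replaces A's per-character index loop (build the word char by char, branching on vowels) with five chained str.replace passes, one per vowel, writing each translated word in one expression.
import Mathlib
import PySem

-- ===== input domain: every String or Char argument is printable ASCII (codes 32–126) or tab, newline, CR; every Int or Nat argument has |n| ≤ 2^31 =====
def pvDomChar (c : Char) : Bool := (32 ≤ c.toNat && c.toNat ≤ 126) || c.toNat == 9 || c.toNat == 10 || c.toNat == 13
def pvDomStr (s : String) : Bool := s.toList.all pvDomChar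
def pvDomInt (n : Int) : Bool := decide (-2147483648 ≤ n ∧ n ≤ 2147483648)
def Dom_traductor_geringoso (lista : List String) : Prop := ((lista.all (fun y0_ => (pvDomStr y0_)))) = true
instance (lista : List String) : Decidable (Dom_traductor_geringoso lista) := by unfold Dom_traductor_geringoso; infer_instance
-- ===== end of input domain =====

-- B replaces A's per-character index loop by five chained str.replace passes (one per vowel); same values, different decomposition (objective: idiomatic).

-- ===== PORT A =====
-- A's inner loop: for i in range(len(elem)): palabra += elem[i]; if elem[i] in vowels: palabra += "p"; palabra += elem[i]
-- (index i is always in range, so the pyGetD default is never read)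
def geringosoWordA (cs : List Char) : List Char :=
  (PySem.List.pyRange 0 (PySem.List.len cs) 1).foldl
    (fun palabra i =>
      let c := PySem.List.pyGetD cs i ' '
      let palabra := palabra ++ [c]
      if c ∈ (['a', 'e', 'i', 'o', 'u'] : List Char) then (palabra ++ ['p']) ++ [c] else palabra)
    []

def traductor_geringoso (lista : List String) : List (String × String) :=
  (lista.foldl
    (fun res elem => PySem.Dict.insert res elem (String.ofList (geringosoWordA elem.toList)))
    (PySem.Dict.mk ([] : List (String × String)))).items

-- ===== PORT B =====
def traductor_geringoso_alt (lista : List String) : List (String × String) :=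
  (lista.foldl
    (fun res elem =>
      PySem.Dict.insert res elem
        (PySem.Str.replace
          (PySem.Str.replace
            (PySem.Str.replace
              (PySem.Str.replace
                (PySem.Str.replace elem "a" "apa") "e" "epe") "i" "ipi") "o" "opo") "u" "upu"))
    (PySem.Dict.mk ([] : List (String × String)))).items

-- ===== PRECONDITION & SPEC =====
def Spec_traductor_geringoso (lista : List String) (out : List (String × String)) : Prop := out = traductor_geringoso_alt lista
instance (lista : List String) (out : List (String × String)) : Decidable (Spec_traductor_geringoso lista out) := by unfold Spec_traductor_geringoso; infer_instance

-- ===== CLAIM (what is proved, stated in full; the proofs are below) =====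
def Claim_equal_traductor_geringoso : Prop := ∀ (lista : List String), Dom_traductor_geringoso lista → Spec_traductor_geringoso lista (traductor_geringoso lista)

-- ===== LEMMAS AND PROOFS =====

-- replacing a SINGLE character is a flatMap
theorem replace_go_single (v : Char) (n : List Char) :
    ∀ (cs : List Char) (fuel : Nat) (acc : List Char), cs.length ≤ fuel →
      PySem.Chars.replace.go [v] n fuel cs acc
        = acc.reverse ++ cs.flatMap (fun c => if c = v then n else [c]) := by
  intro cs
  induction cs with
  | nil => intro fuel acc _; cases fuel <;> simp [PySem.Chars.replace.go]
  | cons c t ih =>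
      intro fuel acc h
      cases fuel with
      | zero => simp at h
      | succ f =>
          by_cases hc : c = v
          · subst hc
            have hp : ([c] : List Char).isPrefixOf (c :: t) = true := by simp [List.isPrefixOf]
            simp only [PySem.Chars.replace.go, hp, if_true]
            have hd : List.drop ([c] : List Char).length (c :: t) = t := rfl
            rw [hd, ih f (n.reverse ++ acc) (by simpa using h)]
            simp
          · have : ([v] : List Char).isPrefixOf (c :: t) = false := by
              simp [List.isPrefixOf]; exact fun hvc => hc hvc.symm
            simp only [PySem.Chars.replace.go, this, if_false, Bool.false_eq_true]
            rw [ih f (c :: acc) (by simpa using h)]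
            simp [hc]

theorem replace_single (v : Char) (n : List Char) (cs : List Char) :
    PySem.Chars.replace cs [v] n = cs.flatMap (fun c => if c = v then n else [c]) := by
  simp only [PySem.Chars.replace, List.isEmpty_cons, Bool.false_eq_true, if_false]
  simpa using replace_go_single v n cs cs.length [] le_rfl

def pvExpand (c : Char) : List Char :=
  if c ∈ (['a', 'e', 'i', 'o', 'u'] : List Char) then [c, 'p', c] else [c]

-- A's index loop computes the flatMap of pvExpand
theorem wordA_eq_flatMap (cs : List Char) : geringosoWordA cs = cs.flatMap pvExpand := by
  unfold geringosoWordA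
  rw [PySem.List.foldl_pyRange_zero_pyGetD cs ' '
        (fun palabra c =>
          if c ∈ (['a', 'e', 'i', 'o', 'u'] : List Char)
          then ((palabra ++ [c]) ++ ['p']) ++ [c] else palabra ++ [c]) []]
  have : (fun (palabra : List Char) (c : Char) =>
          if c ∈ (['a', 'e', 'i', 'o', 'u'] : List Char)
          then ((palabra ++ [c]) ++ ['p']) ++ [c] else palabra ++ [c])
       = (fun palabra c => palabra ++ pvExpand c) := by
    funext palabra c
    by_cases h : c ∈ (['a', 'e', 'i', 'o', 'u'] : List Char) <;> simp [pvExpand, h]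
  rw [this, PySem.List.foldl_append_eq_flatMap]
  simp

-- the five chained single-character replaces compose, character by character, to pvExpand
theorem point_expand (c : Char) :
    List.flatMap
      (fun x =>
        List.flatMap
          (fun x =>
            List.flatMap
              (fun x =>
                List.flatMap (fun d => if d = 'u' then ['u', 'p', 'u'] else [d])
                  (if x = 'o' then ['o', 'p', 'o'] else [x]))
              (if x = 'i' then ['i', 'p', 'i'] else [x]))
          (if x = 'e' then ['e', 'p', 'e'] else [x]))
      (if c = 'a' then ['a', 'p', 'a'] else [c]) = pvExpand c := by
  by_cases ha : c = 'a'; · subst ha; decide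
  by_cases he : c = 'e'; · subst he; decide
  by_cases hi : c = 'i'; · subst hi; decide
  by_cases ho : c = 'o'; · subst ho; decide
  by_cases hu : c = 'u'; · subst hu; decide
  simp [pvExpand, ha, he, hi, ho, hu]

theorem chain_eq_flatMap (cs : List Char) :
    PySem.Chars.replace
      (PySem.Chars.replace
        (PySem.Chars.replace
          (PySem.Chars.replace
            (PySem.Chars.replace cs ['a'] ['a', 'p', 'a']) ['e'] ['e', 'p', 'e'])
              ['i'] ['i', 'p', 'i']) ['o'] ['o', 'p', 'o']) ['u'] ['u', 'p', 'u']
    = cs.flatMap pvExpand := by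
  simp only [replace_single, List.flatMap_assoc]
  exact List.flatMap_congr (fun c _ => point_expand c)

-- per-word agreement, at String level
theorem word_eq (elem : String) :
    String.ofList (geringosoWordA elem.toList)
      = PySem.Str.replace
          (PySem.Str.replace
            (PySem.Str.replace
              (PySem.Str.replace
                (PySem.Str.replace elem "a" "apa") "e" "epe") "i" "ipi") "o" "opo") "u" "upu" := by
  apply String.toList_injective
  simp only [PySem.Str.toList_replace]
  rw [show ("a" : String).toList = ['a'] from rfl, show ("apa" : String).toList = ['a','p','a'] from rfl,
      show ("e" : String).toList = ['e'] from rfl, show ("epe" : String).toList = ['e','p','e'] from rfl,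
      show ("i" : String).toList = ['i'] from rfl, show ("ipi" : String).toList = ['i','p','i'] from rfl,
      show ("o" : String).toList = ['o'] from rfl, show ("opo" : String).toList = ['o','p','o'] from rfl,
      show ("u" : String).toList = ['u'] from rfl, show ("upu" : String).toList = ['u','p','u'] from rfl]
  rw [chain_eq_flatMap, String.toList_ofList]
  exact wordA_eq_flatMap elem.toList

-- ===== VERDICT (by name: the statement is the Claim_ definition above) =====
theorem traductor_geringoso_spec : Claim_equal_traductor_geringoso := by
  intro lista _
  show traductor_geringoso lista = traductor_geringoso_alt lista
  have hf : (fun (res : PySem.Dict String String) (elem : String) =>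
          PySem.Dict.insert res elem (String.ofList (geringosoWordA elem.toList)))
      = (fun (res : PySem.Dict String String) (elem : String) =>
          PySem.Dict.insert res elem
            (PySem.Str.replace
              (PySem.Str.replace
                (PySem.Str.replace
                  (PySem.Str.replace
                    (PySem.Str.replace elem "a" "apa") "e" "epe") "i" "ipi") "o" "opo") "u" "upu")) := by
    funext res elem
    rw [word_eq]
  unfold traductor_geringoso traductor_geringoso_alt
  rw [hf]
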